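-- pv_equiv track=rewrite | github.com/Sandhoshivany-GN/A-December-Of-Algorithms-2025 | December - 28/Sandhoshivany-GN_Sweet Rewards for Students.py | min_sweets
-- ===== SOURCE A (Python) =====
-- def min_sweets(scores):
--     n = len(scores)
--     sweets = [1] * n
--
--     for i in range(1, n):
--         if scores[i] > scores[i - 1]:
--             sweets[i] = sweets[i - 1] + 1
--
--     for i in range(n - 2, -1, -1):
--         if scores[i] > scores[i + 1]:
--             sweets[i] = max(sweets[i], sweets[i + 1] + 1)
--
--
--     return sum(sweets)
-- ===== SOURCE B (Python) =====
-- def min_sweets(scores):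
--     # One forward pass with O(1) extra state (run counters) instead of a sweets array and two passes.
--     if not scores:
--         return 0
--     total = 1
--     up = down = peak = 0
--     prev = scores[0]
--     for x in scores[1:]:
--         if x > prev:
--             up += 1
--             down = 0
--             peak = up
--             total += 1 + up
--         elif x == prev:
--             up = down = peak = 0
--             total += 1
--         else:
--             down += 1
--             up = 0
--             total += down + (1 if down > peak else 0)
--         prev = x
--     return total
-- ===== Notes on version B (the rewrite author's own statement) =====
-- stated objective: faster
-- what changed: Replaced the two-pass candies array (forward increase pass, backward max pass, then sum) with a single forward pass keeping only integer counters: total, length of the current increasing run, length of the current decreasing run, and the candy count at the last peak.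
import Mathlib
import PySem

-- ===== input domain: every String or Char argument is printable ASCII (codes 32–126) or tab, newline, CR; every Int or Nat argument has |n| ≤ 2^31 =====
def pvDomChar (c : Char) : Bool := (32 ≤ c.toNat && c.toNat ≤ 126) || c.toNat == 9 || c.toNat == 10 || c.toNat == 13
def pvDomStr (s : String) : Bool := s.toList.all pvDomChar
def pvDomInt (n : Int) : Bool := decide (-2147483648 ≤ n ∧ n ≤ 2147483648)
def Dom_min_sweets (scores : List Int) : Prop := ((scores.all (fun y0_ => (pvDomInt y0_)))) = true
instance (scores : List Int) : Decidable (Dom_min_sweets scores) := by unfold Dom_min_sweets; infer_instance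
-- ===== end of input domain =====

-- B replaces A's two-pass candies array with a single forward pass keeping only
-- integer run counters (total, up-run, down-run, candies at last peak); O(1) extra space.

-- ===== PORT A =====
def min_sweets (scores : List Int) : Int :=
  let n : Int := scores.length
  let sweets : List Int := List.replicate scores.length 1
  let sweets := (PySem.List.pyRange 1 n 1).foldl (fun sw i =>
    if PySem.List.pyGetD scores i 0 > PySem.List.pyGetD scores (i - 1) 0 then
      PySem.List.pySetD sw i (PySem.List.pyGetD sw (i - 1) 0 + 1)
    else sw) sweets
  let sweets := (PySem.List.pyRange (n - 2) (-1) (-1)).foldl (fun sw i =>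
    if PySem.List.pyGetD scores i 0 > PySem.List.pyGetD scores (i + 1) 0 then
      PySem.List.pySetD sw i (max (PySem.List.pyGetD sw i 0) (PySem.List.pyGetD sw (i + 1) 0 + 1))
    else sw) sweets
  sweets.sum

-- ===== PORT B =====
def min_sweets_alt (scores : List Int) : Int :=
  match scores with
  | [] => 0
  | x :: rest =>
    let st := rest.foldl (fun (st : Int × Int × Int × Int × Int) y =>
      let (total, up, down, peak, prev) := st
      if y > prev then (total + 1 + (up + 1), up + 1, 0, up + 1, y)
      else if y = prev then (total + 1, 0, 0, 0, y)
      else (total + (down + 1) + (if down + 1 > peak then 1 else 0), 0, down + 1, peak, y))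
      (1, 0, 0, 0, x)
    st.1

-- ===== PRECONDITION & SPEC =====
def Spec_min_sweets (scores : List Int) (out : Int) : Prop := out = min_sweets_alt scores
instance (scores : List Int) (out : Int) : Decidable (Spec_min_sweets scores out) := by unfold Spec_min_sweets; infer_instance

-- ===== CLAIM (what is proved, stated in full; the proofs are below) =====
def Claim_equal_min_sweets : Prop := ∀ (scores : List Int), Dom_min_sweets scores → Spec_min_sweets scores (min_sweets scores)

-- ===== LEMMAS AND PROOFS =====

-- forward scan of "left" candy values (length of strictly increasing run), carrying (prev score, prev value)
def Lgo (prev c : Int) : List Int → List Int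
  | [] => []
  | y :: ys => (if prev < y then c + 1 else 1) :: Lgo y (if prev < y then c + 1 else 1) ys

def Lvals : List Int → List Int
  | [] => []
  | x :: xs => 1 :: Lgo x 1 xs

-- carried (last score, last L value) of the scan
def lastPC (prev c : Int) : List Int → Int × Int
  | [] => (prev, c)
  | y :: ys => lastPC y (if prev < y then c + 1 else 1) ys

-- "right" candy values (length of strictly decreasing run to the right)
def Rvals : List Int → List Int
  | [] => []
  | [_] => [1]
  | a :: b :: xs => (if a > b then (Rvals (b :: xs)).headD 0 + 1 else 1) :: Rvals (b :: xs)

-- length of the maximal strictly decreasing run ending at the last element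
def dlen : List Int → Nat
  | [] => 0
  | [_] => 1
  | a :: b :: xs => dlen (b :: xs) + (if a > b ∧ dlen (b :: xs) = (b :: xs).length then 1 else 0)

def spec' (prev c : Int) (s : List Int) : Int := (List.zipWith max (Lgo prev c s) (Rvals s)).sum
def spec (s : List Int) : Int := (List.zipWith max (Lvals s) (Rvals s)).sum

def inc (lastS lastL : Int) (d : Nat) (lpeak x : Int) : Int :=
  if lastS < x then lastL + 1
  else if lastS = x then 1
  else (d : Int) + (if (d : Int) + 1 > lpeak then 1 else 0)

-- basic lengths and positivity
theorem length_Lgo (prev c : Int) (s : List Int) : (Lgo prev c s).length = s.length := by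
  induction s generalizing prev c with
  | nil => rfl
  | cons y ys ih => simp [Lgo, ih]

theorem length_Lvals (s : List Int) : (Lvals s).length = s.length := by
  cases s with
  | nil => rfl
  | cons x xs => simp [Lvals, length_Lgo]

theorem length_Rvals (s : List Int) : (Rvals s).length = s.length := by
  induction s with
  | nil => rfl
  | cons a t ih =>
    cases t with
    | nil => rfl
    | cons b xs => simp [Rvals] at ih ⊢; omega

theorem Lgo_pos (prev c : Int) (s : List Int) (hc : 1 ≤ c) :
    ∀ v ∈ Lgo prev c s, 1 ≤ v := by
  induction s generalizing prev c with
  | nil => simp [Lgo]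
  | cons y ys ih =>
    intro v hv
    simp only [Lgo, List.mem_cons] at hv
    rcases hv with h | h
    · subst h; split <;> omega
    · exact ih y _ (by split <;> omega) v h

theorem Rvals_pos (s : List Int) : ∀ v ∈ Rvals s, 1 ≤ v := by
  induction s with
  | nil => simp [Rvals]
  | cons a t ih =>
    cases t with
    | nil => simp [Rvals]
    | cons b xs =>
      intro v hv
      simp only [Rvals, List.mem_cons] at hv
      rcases hv with h | h
      · subst h
        have hb : Rvals (b :: xs) ≠ [] := by
          have := length_Rvals (b :: xs); intro h; rw [h] at this; simp at this
        have : 1 ≤ (Rvals (b :: xs)).headD 0 := by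
          cases hR : Rvals (b :: xs) with
          | nil => exact absurd hR hb
          | cons r rs => simpa using ih r (by rw [hR]; simp)
        split <;> omega
      · exact ih v h

theorem getLastD_ne_nil {α : Type} (l : List α) (d d' : α) (h : l ≠ []) :
    l.getLastD d = l.getLastD d' := by
  induction l generalizing d d' with
  | nil => exact absurd rfl h
  | cons a t ih =>
    obtain ⟨y, hy⟩ := Option.isSome_iff_exists.mp (List.getLast?_isSome.mpr h)
    simp [List.getLastD_eq_getLast?, hy]

theorem lastPC_fst (prev c : Int) (s : List Int) : (lastPC prev c s).1 = s.getLastD prev := by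
  induction s generalizing prev c with
  | nil => rfl
  | cons y ys ih =>
    rw [List.getLastD_cons]
    simp only [lastPC, ih]

theorem lastPC_snd (prev c : Int) (s : List Int) : (lastPC prev c s).2 = (Lgo prev c s).getLastD c := by
  induction s generalizing prev c with
  | nil => rfl
  | cons y ys ih =>
    simp only [lastPC, Lgo, ih]
    rw [List.getLastD_cons]

theorem Lgo_snoc (prev c : Int) (s : List Int) (x : Int) :
    Lgo prev c (s ++ [x]) =
      Lgo prev c s ++ [if (lastPC prev c s).1 < x then (lastPC prev c s).2 + 1 else 1] := by
  induction s generalizing prev c with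
  | nil => simp [Lgo, lastPC]
  | cons y ys ih => simp [Lgo, lastPC, ih]

theorem Lvals_eq_Lgo (x : Int) (t : List Int) : Lvals (x :: t) = Lgo x 1 (x :: t) := by
  simp [Lvals, Lgo]

theorem Lvals_snoc (q : List Int) (x : Int) (h : q ≠ []) :
    Lvals (q ++ [x]) =
      Lvals q ++ [if q.getLastD 0 < x then (Lvals q).getLastD 0 + 1 else 1] := by
  cases q with
  | nil => exact absurd rfl h
  | cons a t =>
    have h1 : Lvals ((a :: t) ++ [x]) = Lgo a 1 ((a :: t) ++ [x]) := by
      rw [List.cons_append, Lvals_eq_Lgo]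
    rw [h1, Lgo_snoc, ← Lvals_eq_Lgo, lastPC_fst, lastPC_snd, ← Lvals_eq_Lgo]
    have e1 : (a :: t).getLastD a = (a :: t).getLastD 0 := getLastD_ne_nil _ _ _ (by simp)
    have hL : Lvals (a :: t) ≠ [] := by
      have := length_Lvals (a :: t); intro h; rw [h] at this; simp at this
    have e2 : (Lvals (a :: t)).getLastD 1 = (Lvals (a :: t)).getLastD 0 := getLastD_ne_nil _ _ _ hL
    rw [e1, e2]

theorem Lgo_getD_succ (s : List Int) (prev c : Int) (i : Nat) (h : i + 1 < s.length) :
    (Lgo prev c s).getD (i + 1) 0 =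
      if s.getD i 0 < s.getD (i + 1) 0 then (Lgo prev c s).getD i 0 + 1 else 1 := by
  induction s generalizing prev c i with
  | nil => simp at h
  | cons y ys ih =>
    cases i with
    | zero =>
      cases ys with
      | nil => simp at h
      | cons z zs => simp [Lgo]
    | succ j =>
      simp only [Lgo, List.getD_cons_succ]
      exact ih _ _ j (by simpa using h)

theorem dlen_bounds (s : List Int) (h : s ≠ []) : 1 ≤ dlen s ∧ dlen s ≤ s.length := by
  induction s with
  | nil => exact absurd rfl h
  | cons a t ih =>
    cases t with
    | nil => simp [dlen]
    | cons b u =>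
      obtain ⟨h1, h2⟩ := ih (by simp)
      simp only [List.length_cons] at h2 ⊢
      simp only [dlen, List.length_cons]
      split <;> omega

theorem getLastD_cons_ne {α : Type} (a : α) (t : List α) (d : α) (h : t ≠ []) :
    (a :: t).getLastD d = t.getLastD d := by
  rw [List.getLastD_cons]
  exact getLastD_ne_nil _ _ _ h

theorem Rvals_snoc_flat (s : List Int) (x : Int) (h : s ≠ []) (hle : ¬ s.getLastD 0 > x) :
    Rvals (s ++ [x]) = Rvals s ++ [1] := by
  induction s with
  | nil => exact absurd rfl h
  | cons a t ih =>
    cases t with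
    | nil =>
      have hle' : ¬ a > x := by simpa using hle
      simp [Rvals, hle']
    | cons b u =>
      rw [getLastD_cons_ne a (b :: u) 0 (by simp)] at hle
      have ihh := ih (by simp) hle
      simp only [List.cons_append] at ihh ⊢
      rw [Rvals, ihh]
      have hne : Rvals (b :: u) ≠ [] := by
        have := length_Rvals (b :: u); intro hh; rw [hh] at this; simp at this
      cases hR : Rvals (b :: u) with
      | nil => exact absurd hR hne
      | cons r rs => simp [Rvals, hR]

theorem Rvals_headD_full (s : List Int) (h : s ≠ []) (hd : dlen s = s.length) :
    (Rvals s).headD 0 = s.length := by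
  induction s with
  | nil => exact absurd rfl h
  | cons a t ih =>
    cases t with
    | nil => simp [Rvals]
    | cons b u =>
      simp only [dlen, List.length_cons] at hd
      have hb := dlen_bounds (b :: u) (by simp)
      simp only [List.length_cons] at hb
      have h1 : a > b ∧ dlen (b :: u) = u.length + 1 := by
        by_contra hcon
        rw [if_neg hcon] at hd
        omega
      have hih := ih (by simp) (by simpa using h1.2)
      rw [Rvals, if_pos h1.1]
      simp only [List.headD_cons, hih]
      simp

theorem Rvals_headD_snoc_dec (s : List Int) (x : Int) (h : s ≠ []) (hgt : s.getLastD 0 > x) :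
    (Rvals (s ++ [x])).headD 0 =
      (Rvals s).headD 0 + (if dlen s = s.length then 1 else 0) := by
  induction s with
  | nil => exact absurd rfl h
  | cons a t ih =>
    cases t with
    | nil =>
      have hgt' : a > x := by simpa using hgt
      simp [Rvals, dlen, hgt']
    | cons b u =>
      rw [getLastD_cons_ne a (b :: u) 0 (by simp)] at hgt
      have ihh := ih (by simp) hgt
      simp only [List.cons_append] at ihh ⊢
      have hb := dlen_bounds (b :: u) (by simp)
      simp only [List.length_cons] at hb
      by_cases hab : a > b
      · by_cases hfull : dlen (b :: u) = u.length + 1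
        · have hRfull := Rvals_headD_full (b :: u) (by simp) (by simpa using hfull)
          simp only [List.length_cons] at hRfull
          have hlen : dlen (a :: b :: u) = (a :: b :: u).length := by
            simp only [dlen, List.length_cons]
            rw [if_pos (And.intro hab hfull)]
            omega
          rw [Rvals, if_pos hab, Rvals, if_pos hab, if_pos hlen]
          simp only [List.headD_cons]
          rw [ihh, if_pos (show dlen (b :: u) = (b :: u).length by simpa using hfull)]
        · have hlen : ¬ dlen (a :: b :: u) = (a :: b :: u).length := by
            simp only [dlen, List.length_cons]
            rw [if_neg (by tauto : ¬ (a > b ∧ dlen (b :: u) = u.length + 1))]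
            omega
          rw [Rvals, if_pos hab, Rvals, if_pos hab, if_neg hlen]
          simp only [List.headD_cons]
          rw [ihh, if_neg (show ¬ dlen (b :: u) = (b :: u).length by simpa using hfull)]
          omega
      · have hlen : ¬ dlen (a :: b :: u) = (a :: b :: u).length := by
          simp only [dlen, List.length_cons]
          rw [if_neg (by tauto : ¬ (a > b ∧ dlen (b :: u) = u.length + 1))]
          omega
        rw [Rvals, if_neg hab, Rvals, if_neg hab, if_neg hlen]
        simp

theorem dlen_snoc (q : List Int) (x : Int) (h : q ≠ []) :
    dlen (q ++ [x]) = if q.getLastD 0 > x then dlen q + 1 else 1 := by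
  induction q with
  | nil => exact absurd rfl h
  | cons a t ih =>
    cases t with
    | nil =>
      have : ([a] : List Int).getLastD 0 = a := by simp
      rw [this]
      simp [dlen]
      split <;> simp_all
    | cons b u =>
      rw [getLastD_cons_ne a (b :: u) 0 (by simp)]
      have ihh := ih (by simp)
      simp only [List.cons_append] at ihh ⊢
      rw [dlen, ihh]
      have hb := dlen_bounds (b :: u) (by simp)
      simp only [List.length_cons] at hb
      by_cases hgt : (b :: u).getLastD 0 > x
      · rw [if_pos hgt, if_pos hgt]
        simp only [dlen, List.length_cons, List.length_append, List.length_cons]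
        by_cases hfull : a > b ∧ dlen (b :: u) = (b :: u).length
        · simp only [List.length_cons] at hfull
          rw [if_pos hfull]
          have hc : a > b ∧ dlen (b :: u) + 1 = u.length + 1 + 1 := ⟨hfull.1, by omega⟩
          rw [if_pos (by simpa using hc)]
        · simp only [List.length_cons] at hfull
          rw [if_neg hfull]
          have hc : ¬ (a > b ∧ dlen (b :: u) + 1 = u.length + 1 + 1) := by
            intro hcc; exact hfull ⟨hcc.1, by omega⟩
          rw [if_neg (by simpa using hc)]
      · rw [if_neg hgt, if_neg hgt]
        have hc : ¬ (a > b ∧ (1 : Nat) = (b :: (u ++ [x])).length) := by simp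
        rw [if_neg hc]

theorem Rvals_ne_nil (s : List Int) (h : s ≠ []) : Rvals s ≠ [] := by
  have hl := length_Rvals s
  intro hh; rw [hh] at hl
  cases s with
  | nil => exact absurd rfl h
  | cons a t => simp at hl

theorem Lgo_ne_nil (prev c : Int) (s : List Int) (h : s ≠ []) : Lgo prev c s ≠ [] := by
  have hl := length_Lgo prev c s
  intro hh; rw [hh] at hl
  cases s with
  | nil => exact absurd rfl h
  | cons a t => simp at hl

theorem headD_append {α : Type} (l l' : List α) (d : α) (h : l ≠ []) :
    (l ++ l').headD d = l.headD d := by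
  cases l with
  | nil => exact absurd rfl h
  | cons a t => simp

theorem Lgo_getD_pos (prev c : Int) (s : List Int) (i : Nat) (hc : 1 ≤ c) (hi : i < s.length) :
    1 ≤ (Lgo prev c s).getD i 0 := by
  have hl : i < (Lgo prev c s).length := by rw [length_Lgo]; exact hi
  rw [List.getD_eq_getElem _ _ hl]
  exact Lgo_pos prev c s hc _ (List.getElem_mem hl)

theorem Rvals_headD_pos (s : List Int) (h : s ≠ []) : 1 ≤ (Rvals s).headD 0 := by
  cases hR : Rvals s with
  | nil => exact absurd hR (Rvals_ne_nil s h)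
  | cons r rs => simpa using Rvals_pos s r (by rw [hR]; simp)

theorem spec'_cons_cons (prev c a b : Int) (l : List Int) :
    spec' prev c (a :: b :: l) =
      max (if prev < a then c + 1 else 1) (if a > b then (Rvals (b :: l)).headD 0 + 1 else 1)
        + spec' a (if prev < a then c + 1 else 1) (b :: l) := by
  simp only [spec', Lgo, Rvals, List.zipWith_cons_cons, List.sum_cons]

theorem spec'_snoc (s : List Int) (prev c x : Int) (h : s ≠ []) (hc : 1 ≤ c) :
    spec' prev c (s ++ [x]) = spec' prev c s +
      inc (s.getLastD 0) ((Lgo prev c s).getLastD 0) (dlen s)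
          ((Lgo prev c s).getD (s.length - dlen s) 0) x := by
  induction s generalizing prev c with
  | nil => exact absurd rfl h
  | cons a t ih =>
    have hc1 : 1 ≤ (if prev < a then c + 1 else 1 : Int) := by split <;> omega
    cases t with
    | nil =>
      simp only [List.cons_append, List.nil_append]
      simp [spec', Lgo, Rvals, inc, dlen, max_def]
      rcases lt_trichotomy a x with h1 | h1 | h1 <;> split_ifs <;> omega
    | cons b t' =>
      -- abbreviations
      set c1 : Int := if prev < a then c + 1 else 1 with hc1def
      have hTne : (b :: t') ≠ [] := by simp
      have hLne : Lgo a c1 (b :: t') ≠ [] := Lgo_ne_nil _ _ _ hTne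
      have hRne : Rvals (b :: t') ≠ [] := Rvals_ne_nil _ hTne
      have hdb := dlen_bounds (b :: t') hTne
      -- unfold both sides as head-term + spec' of tail
      have lhs1 : spec' prev c ((a :: b :: t') ++ [x]) =
          max c1 (if a > b then (Rvals (b :: t' ++ [x])).headD 0 + 1 else 1)
            + spec' a c1 (b :: t' ++ [x]) := by
        simpa using spec'_cons_cons prev c a b (t' ++ [x])
      have rhs1 : spec' prev c (a :: b :: t') =
          max c1 (if a > b then (Rvals (b :: t')).headD 0 + 1 else 1)
            + spec' a c1 (b :: t') := spec'_cons_cons prev c a b t'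
      have ihh := ih a c1 hTne hc1
      rw [show (b :: t') ++ [x] = b :: t' ++ [x] by simp] at ihh
      rw [lhs1, ihh, rhs1]
      -- simplify the outer-level inc arguments
      have eLast : (a :: b :: t').getLastD 0 = (b :: t').getLastD 0 :=
        getLastD_cons_ne a (b :: t') 0 hTne
      have eCons : Lgo prev c (a :: b :: t') = c1 :: Lgo a c1 (b :: t') := by
        rw [hc1def]; rfl
      have eLgoLast : (Lgo prev c (a :: b :: t')).getLastD 0 = (Lgo a c1 (b :: t')).getLastD 0 := by
        rw [eCons]
        exact getLastD_cons_ne _ _ _ hLne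
      have eDlen : dlen (a :: b :: t') =
          dlen (b :: t') + (if a > b ∧ dlen (b :: t') = (b :: t').length then 1 else 0) := rfl
      rw [eLast, eLgoLast]
      -- case split on the comparison of the last element with x
      rcases lt_trichotomy ((b :: t').getLastD 0) x with hcmp | hcmp | hcmp
      · -- last < x : both incs take the first branch; R head unchanged
        have hflat := Rvals_snoc_flat (b :: t') x hTne (by omega)
        rw [show Rvals (b :: t' ++ [x]) = Rvals ((b :: t') ++ [x]) by simp, hflat,
          headD_append _ _ _ hRne]
        simp only [inc, if_pos hcmp]
        ring
      · -- last = x : second branch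
        have hflat := Rvals_snoc_flat (b :: t') x hTne (by omega)
        rw [show Rvals (b :: t' ++ [x]) = Rvals ((b :: t') ++ [x]) by simp, hflat,
          headD_append _ _ _ hRne]
        simp only [inc, if_neg (by omega : ¬ (b :: t').getLastD 0 < x), if_pos hcmp]
        ring
      · -- last > x : third branch
        have hdec := Rvals_headD_snoc_dec (b :: t') x hTne (by omega)
        rw [show Rvals (b :: t' ++ [x]) = Rvals ((b :: t') ++ [x]) by simp, hdec]
        simp only [inc, if_neg (by omega : ¬ (b :: t').getLastD 0 < x),
          if_neg (by omega : ¬ (b :: t').getLastD 0 = x)]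
        by_cases hfull : dlen (b :: t') = (b :: t').length
        · by_cases hab : a > b
          · -- chain covers everything and extends over a
            have hH := Rvals_headD_full (b :: t') hTne hfull
            have eD : dlen (a :: b :: t') = dlen (b :: t') + 1 := by
              rw [eDlen, if_pos ⟨hab, hfull⟩]
            have eIdx0 : (a :: b :: t').length - dlen (a :: b :: t') = 0 := by
              rw [eD]; simp [hfull]
            have eLp : (Lgo prev c (a :: b :: t')).getD 0 0 = c1 := by
              rw [eCons]; rfl
            have eLpT : (Lgo a c1 (b :: t')).getD ((b :: t').length - dlen (b :: t')) 0 = 1 := by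
              rw [hfull]; simp [Lgo, Nat.sub_self, if_neg (by omega : ¬ a < b)]
            rw [eIdx0, eLp, eD]
            simp only [if_pos hab, if_pos hfull, hH, eLpT]
            have hd1 : 1 ≤ dlen (b :: t') := hdb.1
            simp only [max_def]
            split_ifs <;> push_cast [hfull] at * <;> linarith
          · -- full chain but a does not extend it
            have eD : dlen (a :: b :: t') = dlen (b :: t') := by
              rw [eDlen, if_neg (by tauto)]; omega
            have eIdx : (a :: b :: t').length - dlen (a :: b :: t') =
                ((b :: t').length - dlen (b :: t')) + 1 := by
              rw [eD]
              obtain ⟨hd1, hd2⟩ := hdb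
              simp only [List.length_cons] at hd2 ⊢
              omega
            have eLp : (Lgo prev c (a :: b :: t')).getD
                (((b :: t').length - dlen (b :: t')) + 1) 0 =
                (Lgo a c1 (b :: t')).getD ((b :: t').length - dlen (b :: t')) 0 := by
              rw [eCons]; rfl
            rw [eIdx, eLp, eD, if_neg hab, if_neg hab]
            ring
        · -- chain does not cover the whole tail: nothing at the outer level changes
          have eD : dlen (a :: b :: t') = dlen (b :: t') := by
            rw [eDlen, if_neg (by tauto)]; omega
          have eIdx : (a :: b :: t').length - dlen (a :: b :: t') =
              ((b :: t').length - dlen (b :: t')) + 1 := by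
            rw [eD]
            obtain ⟨hd1, hd2⟩ := hdb
            simp only [List.length_cons] at hd2 ⊢
            omega
          have eLp : (Lgo prev c (a :: b :: t')).getD
              (((b :: t').length - dlen (b :: t')) + 1) 0 =
              (Lgo a c1 (b :: t')).getD ((b :: t').length - dlen (b :: t')) 0 := by
            rw [eCons]; rfl
          rw [eIdx, eLp, eD, if_neg hfull]
          simp only [add_zero]
          ring

theorem spec_eq_spec' (a : Int) (t : List Int) : spec (a :: t) = spec' a 1 (a :: t) := by
  simp [spec, spec', Lvals_eq_Lgo]

theorem spec_snoc (q : List Int) (x : Int) (h : q ≠ []) :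
    spec (q ++ [x]) = spec q +
      inc (q.getLastD 0) ((Lvals q).getLastD 0) (dlen q)
        ((Lvals q).getD (q.length - dlen q) 0) x := by
  cases q with
  | nil => exact absurd rfl h
  | cons a t =>
    rw [List.cons_append, spec_eq_spec', ← List.cons_append,
      spec'_snoc (a :: t) a 1 x (by simp) le_rfl, ← spec_eq_spec', ← Lvals_eq_Lgo]

theorem getD_append_length (l : List Int) (a d : Int) : (l ++ [a]).getD l.length d = a := by
  induction l with
  | nil => rfl
  | cons b t ih => simpa using ih

theorem getD_append_lt (l l' : List Int) (n : Nat) (d : Int) (h : n < l.length) :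
    (l ++ l').getD n d = l.getD n d := by
  rw [List.getD_eq_getElem _ _ (by simp; omega), List.getD_eq_getElem _ _ h]
  exact List.getElem_append_left h

theorem getLastD_concat (l : List Int) (a d : Int) : (l ++ [a]).getLastD d = a := by
  simp [List.getLastD_eq_getLast?]

theorem bloop (rest : List Int) : ∀ q : List Int, q ≠ [] →
    ((rest.foldl (fun (st : Int × Int × Int × Int × Int) y =>
      let (total, up, down, peak, prev) := st
      if y > prev then (total + 1 + (up + 1), up + 1, 0, up + 1, y)
      else if y = prev then (total + 1, 0, 0, 0, y)
      else (total + (down + 1) + (if down + 1 > peak then 1 else 0), 0, down + 1, peak, y))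
      (spec q, (Lvals q).getLastD 0 - 1, (dlen q : Int) - 1,
        (Lvals q).getD (q.length - dlen q) 0 - 1, q.getLastD 0))).1
      = spec (q ++ rest) := by
  induction rest with
  | nil => intro q hq; simp
  | cons y ys ih =>
    intro q hq
    have hq' : q ++ [y] ≠ [] := by simp
    have hlen : (Lvals q).length = q.length := length_Lvals q
    have hdb := dlen_bounds q hq
    have hL := Lvals_snoc q y hq
    have hspec := spec_snoc q y hq
    have hlastval : (q ++ [y]).getLastD 0 = y := getLastD_concat q y 0
    have hlastL' : (Lvals (q ++ [y])).getLastD 0 =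
        (if q.getLastD 0 < y then (Lvals q).getLastD 0 + 1 else 1) := by
      rw [hL]; exact getLastD_concat _ _ 0
    have hdlen' := dlen_snoc q y hq
    have hLpk' : (Lvals (q ++ [y])).getD ((q ++ [y]).length - dlen (q ++ [y])) 0 =
        if q.getLastD 0 > y then (Lvals q).getD (q.length - dlen q) 0
        else (if q.getLastD 0 < y then (Lvals q).getLastD 0 + 1 else 1) := by
      rw [hL, hdlen']
      by_cases hgt : q.getLastD 0 > y
      · rw [if_pos hgt, if_pos hgt]
        have e : (q ++ [y]).length - (dlen q + 1) = q.length - dlen q := by simp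
        rw [e]
        exact getD_append_lt _ _ _ _ (by omega)
      · rw [if_neg hgt, if_neg hgt]
        have e : (q ++ [y]).length - 1 = q.length := by simp
        rw [e, ← hlen]
        exact getD_append_length _ _ 0
    rw [List.foldl_cons]
    rw [show q ++ y :: ys = (q ++ [y]) ++ ys by simp]
    rw [← ih (q ++ [y]) hq']
    congr 2
    rcases lt_trichotomy (q.getLastD 0) y with hcm | hcm | hcm
    · -- strictly increasing step
      simp only [if_pos (show y > q.getLastD 0 from hcm)]
      simp only [inc, if_pos hcm] at hspec
      rw [hspec, hlastval, hlastL', hLpk', hdlen']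
      simp only [if_pos hcm, if_neg (show ¬ q.getLastD 0 > y by omega), Prod.mk.injEq]
      and_intros <;> (try push_cast) <;> (try ring)
    · -- equal step
      simp only [if_neg (by omega : ¬ y > q.getLastD 0), if_pos (by omega : y = q.getLastD 0)]
      simp only [inc, if_neg (by omega : ¬ q.getLastD 0 < y), if_pos hcm] at hspec
      rw [hspec, hlastval, hlastL', hLpk', hdlen']
      simp only [if_neg (show ¬ q.getLastD 0 < y by omega), if_neg (show ¬ q.getLastD 0 > y by omega),
        Prod.mk.injEq]
      and_intros <;> (try push_cast) <;> (try ring)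
    · -- strictly decreasing step
      simp only [if_neg (by omega : ¬ y > q.getLastD 0), if_neg (by omega : ¬ y = q.getLastD 0)]
      simp only [inc, if_neg (by omega : ¬ q.getLastD 0 < y),
        if_neg (by omega : ¬ q.getLastD 0 = y)] at hspec
      rw [hspec, hlastval, hlastL', hLpk', hdlen']
      simp only [if_neg (show ¬ q.getLastD 0 < y by omega), if_pos (show q.getLastD 0 > y by omega),
        Prod.mk.injEq]
      and_intros <;> (try push_cast) <;> (try ring)
      all_goals split_ifs <;> push_cast <;> omega

theorem alt_eq_spec (s : List Int) : min_sweets_alt s = spec s := by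
  cases s with
  | nil => simp [min_sweets_alt, spec, Lvals, Rvals]
  | cons x rest =>
    have hb := bloop rest [x] (by simp)
    have e1 : spec [x] = 1 := by simp [spec, Lvals, Lgo, Rvals]
    have e2 : (Lvals [x]).getLastD 0 = 1 := by simp [Lvals, Lgo]
    have e3 : dlen [x] = 1 := rfl
    have e4 : (Lvals [x]).getD ([x].length - dlen [x]) 0 = 1 := by simp [Lvals, Lgo, dlen]
    have e5 : ([x] : List Int).getLastD 0 = x := by simp
    rw [e1, e2, e4, e3, e5] at hb
    simpa [min_sweets_alt] using hb

theorem getD_append_right_len (l1 l2 : List Int) (d : Int) :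
    (l1 ++ l2).getD l1.length d = l2.getD 0 d := by
  induction l1 with
  | nil => rfl
  | cons b t ih => simpa using ih

theorem set_append_len (l1 l2 : List Int) (a v : Int) :
    (l1 ++ a :: l2).set l1.length v = l1 ++ v :: l2 := by
  induction l1 with
  | nil => rfl
  | cons b t ih => simp [ih]

theorem getD_take (s : List Int) (k i : Nat) (h : i < k) :
    (s.take k).getD i 0 = s.getD i 0 := by
  rcases lt_or_ge i s.length with hi | hi
  · rw [List.getD_eq_getElem _ _ (by simp; omega), List.getD_eq_getElem _ _ hi]
    simp [List.getElem_take]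
  · rw [List.getD_eq_default _ _ (by simp; omega), List.getD_eq_default _ _ hi]

theorem getLastD_eq_getD (l : List Int) (h : l ≠ []) :
    l.getLastD 0 = l.getD (l.length - 1) 0 := by
  induction l with
  | nil => exact absurd rfl h
  | cons a t ih =>
    cases t with
    | nil => rfl
    | cons b u =>
      rw [getLastD_cons_ne a (b :: u) 0 (by simp), ih (by simp)]
      simp
      rfl

theorem getLastD_take (s : List Int) (k : Nat) (h1 : 1 ≤ k) (h2 : k ≤ s.length) :
    (s.take k).getLastD 0 = s.getD (k - 1) 0 := by
  rw [getLastD_eq_getD _ (by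
    intro hh
    have hlen : (s.take k).length = 0 := by rw [hh]; rfl
    rw [List.length_take] at hlen
    omega)]
  rw [List.length_take]
  rw [show min k s.length - 1 = k - 1 by omega]
  exact getD_take s k (k - 1) (by omega)

theorem headD_drop (l : List Int) (j : Nat) (h : j < l.length) :
    (l.drop j).headD 0 = l.getD j 0 := by
  have h' : j < (l.drop j).length + j := by simp; omega
  rw [List.getD_eq_getElem _ _ h]
  cases hD : l.drop j with
  | nil => have := congrArg List.length hD; simp at this; omega
  | cons a u =>
    have : l[j] = a := by
      have := List.getElem_drop (xs := l) (i := j) (j := 0) (h := by simp [hD])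
      simpa [hD] using this.symm
    simp [this]

theorem headD_zipWith (l1 l2 : List Int) (h1 : l1 ≠ []) (h2 : l2 ≠ []) :
    (List.zipWith max l1 l2).headD 0 = max (l1.headD 0) (l2.headD 0) := by
  cases l1 with
  | nil => exact absurd rfl h1
  | cons a t =>
    cases l2 with
    | nil => exact absurd rfl h2
    | cons b u => simp

theorem Lvals_getD_pos (s : List Int) (i : Nat) (h : i < s.length) :
    1 ≤ (Lvals s).getD i 0 := by
  cases s with
  | nil => simp at h
  | cons x t =>
    rw [Lvals_eq_Lgo]
    exact Lgo_getD_pos x 1 (x :: t) i le_rfl h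

theorem Lvals_getD_succ (s : List Int) (i : Nat) (h : i + 1 < s.length) :
    (Lvals s).getD (i + 1) 0 =
      if s.getD i 0 < s.getD (i + 1) 0 then (Lvals s).getD i 0 + 1 else 1 := by
  cases s with
  | nil => simp at h
  | cons x t =>
    rw [Lvals_eq_Lgo]
    exact Lgo_getD_succ (x :: t) x 1 i h

theorem take_succ_getD (s : List Int) (k : Nat) (h : k < s.length) :
    s.take (k + 1) = s.take k ++ [s.getD k 0] := by
  rw [List.take_succ, List.getElem?_eq_getElem h, List.getD_eq_getElem _ _ h]
  rfl

-- ===== loop 1 of A: forward pass builds the Lvals array =====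
theorem loop1 (s : List Int) (hs : s ≠ []) :
    ∀ k : Nat, 1 ≤ k → k ≤ s.length →
    (PySem.List.pyRange 1 (k : Int) 1).foldl (fun sw i =>
        if PySem.List.pyGetD s i 0 > PySem.List.pyGetD s (i - 1) 0 then
          PySem.List.pySetD sw i (PySem.List.pyGetD sw (i - 1) 0 + 1)
        else sw) (List.replicate s.length 1)
      = Lvals (s.take k) ++ List.replicate (s.length - k) 1 := by
  intro k hk1 hk2
  induction k with
  | zero => omega
  | succ k ih =>
    rcases Nat.eq_or_lt_of_le hk1 with h1 | h1
    · -- k + 1 = 1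
      rw [← h1]
      rw [PySem.List.pyRange_one_eq_nil (by norm_num)]
      cases s with
      | nil => exact absurd rfl hs
      | cons x t =>
        simp [Lvals, Lgo, List.replicate_succ]
    · -- 1 ≤ k
      have hk : 1 ≤ k := by omega
      have hkn : k < s.length := by omega
      have ihh := ih hk (by omega)
      rw [show ((k + 1 : Nat) : Int) = (k : Int) + 1 by push_cast; ring,
        PySem.List.pyRange_one_succ_right (by exact_mod_cast hk), List.foldl_append,
        List.foldl_cons, List.foldl_nil, ihh]
      have hTk : (s.take k) ≠ [] := by
        intro hh
        have hlen : (s.take k).length = 0 := by rw [hh]; rfl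
        rw [List.length_take] at hlen
        omega
      have hLlen : (Lvals (s.take k)).length = k := by
        rw [length_Lvals, List.length_take]; omega
      have hcast : ((k : Int) - 1) = ((k - 1 : Nat) : Int) := by omega
      simp only [PySem.List.pyGetD_natCast, hcast, PySem.List.pySetD_natCast]
      have hgetst : (Lvals (s.take k) ++ List.replicate (s.length - k) 1).getD (k - 1) 0 =
          (Lvals (s.take k)).getD (k - 1) 0 :=
        getD_append_lt _ _ _ _ (by omega)
      have hsnoc := Lvals_snoc (s.take k) (s.getD k 0) hTk
      rw [← take_succ_getD s k hkn] at hsnoc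
      have hlast := getLastD_take s k hk (by omega)
      have hlastL : (Lvals (s.take k)).getLastD 0 = (Lvals (s.take k)).getD (k - 1) 0 := by
        rw [getLastD_eq_getD _ (by intro hh; rw [hh] at hLlen; simp at hLlen; omega), hLlen]
      rw [hlast, hlastL] at hsnoc
      have hrep : List.replicate (s.length - k) (1 : Int) =
          1 :: List.replicate (s.length - (k + 1)) 1 := by
        rw [show s.length - k = (s.length - (k + 1)) + 1 by omega, List.replicate_succ]
      by_cases hcond : s.getD k 0 > s.getD (k - 1) 0
      · have hset := set_append_len (Lvals (s.take k))
          (List.replicate (s.length - (k + 1)) 1) 1 ((Lvals (s.take k)).getD (k - 1) 0 + 1)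
        rw [hLlen] at hset
        rw [if_pos hcond, hgetst, hrep, hset, hsnoc,
          if_pos (show s.getD (k - 1) 0 < s.getD k 0 from hcond)]
        simp
      · rw [if_neg hcond, hsnoc, if_neg (show ¬ s.getD (k - 1) 0 < s.getD k 0 by omega), hrep]
        simp

-- ===== loop 2 of A: backward pass turns Lvals into max(L, R) =====
theorem loop2_step (s : List Int) (i : Nat) (h : i + 1 < s.length) :
    (fun (sw : List Int) (j : Int) =>
        if PySem.List.pyGetD s j 0 > PySem.List.pyGetD s (j + 1) 0 then
          PySem.List.pySetD sw j
            (max (PySem.List.pyGetD sw j 0) (PySem.List.pyGetD sw (j + 1) 0 + 1))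
        else sw)
      ((Lvals s).take (i + 1) ++
        List.zipWith max ((Lvals s).drop (i + 1)) (Rvals (s.drop (i + 1)))) (i : Int)
    = (Lvals s).take i ++ List.zipWith max ((Lvals s).drop i) (Rvals (s.drop i)) := by
  have hL : (Lvals s).length = s.length := length_Lvals s
  have hdrop1ne : s.drop (i + 1) ≠ [] := by
    intro hh; have := congrArg List.length hh; simp at this; omega
  have hLd1ne : (Lvals s).drop (i + 1) ≠ [] := by
    intro hh; have := congrArg List.length hh; simp [hL] at this; omega
  have hRne := Rvals_ne_nil _ hdrop1ne
  have hsi : s.drop i = s.getD i 0 :: s.drop (i + 1) := by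
    rw [List.drop_eq_getElem_cons (by omega), List.getD_eq_getElem _ _ (by omega)]
  have hsi1 : s.drop (i + 1) = s.getD (i + 1) 0 :: s.drop (i + 2) := by
    rw [List.drop_eq_getElem_cons (by omega), List.getD_eq_getElem _ _ (by omega)]
  have hLi : (Lvals s).drop i = (Lvals s).getD i 0 :: (Lvals s).drop (i + 1) := by
    rw [List.drop_eq_getElem_cons (by omega), List.getD_eq_getElem _ _ (by omega)]
  have hRcons : Rvals (s.drop i) =
      (if s.getD i 0 > s.getD (i + 1) 0 then (Rvals (s.drop (i + 1))).headD 0 + 1 else 1)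
        :: Rvals (s.drop (i + 1)) := by
    rw [hsi, hsi1, Rvals, ← hsi1]
  have htk : (Lvals s).take (i + 1) = (Lvals s).take i ++ [(Lvals s).getD i 0] :=
    take_succ_getD _ i (by omega)
  have htklen : ((Lvals s).take i).length = i := by simp; omega
  simp only [PySem.List.pyGetD_natCast, PySem.List.pySetD_natCast,
    show ((i : Int) + 1) = ((i + 1 : Nat) : Int) by push_cast; ring]
  have hget_i : ((Lvals s).take (i + 1) ++
      List.zipWith max ((Lvals s).drop (i + 1)) (Rvals (s.drop (i + 1)))).getD i 0 =
      (Lvals s).getD i 0 := by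
    rw [getD_append_lt _ _ _ _ (by simp; omega)]
    exact getD_take _ _ _ (by omega)
  have hziplen : (List.zipWith max ((Lvals s).drop (i + 1)) (Rvals (s.drop (i + 1)))).length
      = s.length - (i + 1) := by
    simp [hL, length_Rvals]
  have hH1 : 1 ≤ (Rvals (s.drop (i + 1))).headD 0 := Rvals_headD_pos _ hdrop1ne
  have hget_i1 : ((Lvals s).take (i + 1) ++
      List.zipWith max ((Lvals s).drop (i + 1)) (Rvals (s.drop (i + 1)))).getD (i + 1) 0 =
      max ((Lvals s).getD (i + 1) 0) ((Rvals (s.drop (i + 1))).headD 0) := by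
    have e1 : ((Lvals s).take (i + 1)).length = i + 1 := by rw [List.length_take]; omega
    have hgr := getD_append_right_len ((Lvals s).take (i + 1))
      (List.zipWith max ((Lvals s).drop (i + 1)) (Rvals (s.drop (i + 1)))) 0
    rw [e1] at hgr
    rw [hgr]
    have hzw := headD_zipWith _ _ hLd1ne hRne
    rw [headD_drop _ _ (by omega)] at hzw
    rw [← hzw]
    cases hz : List.zipWith max ((Lvals s).drop (i + 1)) (Rvals (s.drop (i + 1))) with
    | nil =>
      have := congrArg List.length hz
      rw [hziplen] at this; simp at this; omega
    | cons a u => simp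
  by_cases hcond : s.getD i 0 > s.getD (i + 1) 0
  · have hset := set_append_len ((Lvals s).take i)
      (List.zipWith max ((Lvals s).drop (i + 1)) (Rvals (s.drop (i + 1))))
      ((Lvals s).getD i 0)
      (max ((Lvals s).getD i 0) (max ((Lvals s).getD (i + 1) 0) ((Rvals (s.drop (i + 1))).headD 0) + 1))
    rw [htklen] at hset
    have hL1 : (Lvals s).getD (i + 1) 0 = 1 := by
      rw [Lvals_getD_succ s i (by omega), if_neg (by omega : ¬ s.getD i 0 < s.getD (i + 1) 0)]
    rw [if_pos hcond, hget_i, hget_i1, htk, List.append_assoc, List.singleton_append, hset,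
      hLi, hRcons, if_pos hcond, hL1, max_eq_right hH1]
    simp only [List.zipWith_cons_cons]
  · rw [if_neg hcond, hLi, hRcons, if_neg hcond, htk, List.append_assoc, List.singleton_append]
    have hLpos : 1 ≤ (Lvals s).getD i 0 := Lvals_getD_pos s i (by omega)
    simp only [List.zipWith_cons_cons]
    rw [max_eq_left hLpos]

theorem loop2_fold (s : List Int) : ∀ i : Nat, i + 1 < s.length →
    (PySem.List.pyRange (i : Int) (-1) (-1)).foldl (fun sw j =>
        if PySem.List.pyGetD s j 0 > PySem.List.pyGetD s (j + 1) 0 then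
          PySem.List.pySetD sw j
            (max (PySem.List.pyGetD sw j 0) (PySem.List.pyGetD sw (j + 1) 0 + 1))
        else sw)
      ((Lvals s).take (i + 1) ++
        List.zipWith max ((Lvals s).drop (i + 1)) (Rvals (s.drop (i + 1))))
    = List.zipWith max (Lvals s) (Rvals s) := by
  intro i
  induction i with
  | zero =>
    intro h
    rw [show ((0 : Nat) : Int) = 0 by norm_num,
      PySem.List.pyRange_neg_one_cons (by norm_num),
      PySem.List.pyRange_neg_one_eq_nil (by norm_num), List.foldl_cons, List.foldl_nil]
    have hstep := loop2_step s 0 h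
    rw [show ((0 : Nat) : Int) = 0 by norm_num] at hstep
    simp only [] at hstep
    rw [hstep]
    simp
  | succ i ihi =>
    intro h
    rw [PySem.List.pyRange_neg_one_cons (by push_cast; omega), List.foldl_cons]
    have hstep := loop2_step s (i + 1) h
    simp only [] at hstep
    rw [show ((i + 1 : Nat) : Int) - 1 = ((i : Nat) : Int) by push_cast; ring]
    rw [hstep]
    exact ihi (by omega)

theorem a_eq_spec (s : List Int) : min_sweets s = spec s := by
  cases s with
  | nil => rfl
  | cons x t =>
    cases t with
    | nil =>
      simp [min_sweets, spec, Lvals, Lgo, Rvals,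
        PySem.List.pyRange_one_eq_nil (by norm_num : (1 : Int) ≤ 1),
        PySem.List.pyRange_neg_one_eq_nil (by norm_num : (1 : Int) - 2 ≤ -1)]
    | cons y t' =>
      have hlen : 2 ≤ (x :: y :: t').length := by simp
      simp only [min_sweets]
      rw [loop1 (x :: y :: t') (by simp) (x :: y :: t').length (by omega) le_rfl,
        List.take_length, Nat.sub_self, List.replicate_zero, List.append_nil]
      have hL : (Lvals (x :: y :: t')).length = (x :: y :: t').length :=
        length_Lvals _
      have hm1 : ((x :: y :: t').length - 2) + 1 = (x :: y :: t').length - 1 := by omega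
      have hdroplast : (x :: y :: t').drop ((x :: y :: t').length - 1) =
          [(x :: y :: t').getD ((x :: y :: t').length - 1) 0] := by
        rw [List.drop_eq_getElem_cons (by omega),
          List.getD_eq_getElem _ _ (by omega)]
        congr 1
        rw [show (x :: y :: t').length - 1 + 1 = (x :: y :: t').length by omega,
          List.drop_length]
      have hdropL : (Lvals (x :: y :: t')).drop ((x :: y :: t').length - 1) =
          [(Lvals (x :: y :: t')).getD ((x :: y :: t').length - 1) 0] := by
        rw [List.drop_eq_getElem_cons (by omega),
          List.getD_eq_getElem _ _ (by omega)]
        congr 1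
        rw [show (x :: y :: t').length - 1 + 1 = (Lvals (x :: y :: t')).length by omega,
          List.drop_length]
      have hinit : Lvals (x :: y :: t') =
          (Lvals (x :: y :: t')).take (((x :: y :: t').length - 2) + 1) ++
            List.zipWith max
              ((Lvals (x :: y :: t')).drop (((x :: y :: t').length - 2) + 1))
              (Rvals ((x :: y :: t').drop (((x :: y :: t').length - 2) + 1))) := by
        rw [hm1, hdroplast, hdropL, Rvals]
        simp only [List.zipWith_cons_cons, List.zipWith_nil_right]
        rw [max_eq_left (Lvals_getD_pos _ _ (by omega))]
        rw [← take_succ_getD _ _ (by omega),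
          show (x :: y :: t').length - 1 + 1 = (x :: y :: t').length by omega,
          ← hL, List.take_length]
      rw [show ((x :: y :: t').length : Int) - 2 =
          (((x :: y :: t').length - 2 : Nat) : Int) by omega]
      rw [hinit, loop2_fold (x :: y :: t') ((x :: y :: t').length - 2) (by omega)]
      rfl

theorem min_sweets_spec : Claim_equal_min_sweets := by
  intro scores _
  show min_sweets scores = min_sweets_alt scores
  rw [a_eq_spec, alt_eq_spec]
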